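-- pv_equiv track=rewrite | github.com/augustin64/advent-of-code | 2023/day10.py | find_enclosed
-- ===== SOURCE A (Python) =====
-- def find_enclosed(sample):
--     down = ['|', '7', 'F']
--     enclosed = []
--
--     for i in range(len(sample)):
--         up = False
--         for j in range(len(sample[0])):
--             if sample[i][j] in down:
--                 up = not up
--             if up and sample[i][j] == '.':
--                 enclosed.append((i, j))
--
--     return enclosed
-- ===== SOURCE B (Python) =====
-- def find_enclosed(sample):
--     if not sample:
--         return []
--     w = len(sample[0])
--     walls = '|7F'
--     return [(i, j)
--             for i in range(len(sample))
--             for j in range(w)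
--             if sample[i][j] == '.'
--             and sum(sample[i][k] in walls for k in range(j)) % 2 == 1]
-- ===== Notes on version B (the rewrite author's own statement) =====
-- stated objective: alternative
-- what changed: Replaces A's stateful inner loop toggling an up/down parity flag with direct per-cell ray casting: for each '.' cell, count the wall characters '|7F' strictly to its left and keep the cell iff that count is odd; no running state is maintained.
import Mathlib
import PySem

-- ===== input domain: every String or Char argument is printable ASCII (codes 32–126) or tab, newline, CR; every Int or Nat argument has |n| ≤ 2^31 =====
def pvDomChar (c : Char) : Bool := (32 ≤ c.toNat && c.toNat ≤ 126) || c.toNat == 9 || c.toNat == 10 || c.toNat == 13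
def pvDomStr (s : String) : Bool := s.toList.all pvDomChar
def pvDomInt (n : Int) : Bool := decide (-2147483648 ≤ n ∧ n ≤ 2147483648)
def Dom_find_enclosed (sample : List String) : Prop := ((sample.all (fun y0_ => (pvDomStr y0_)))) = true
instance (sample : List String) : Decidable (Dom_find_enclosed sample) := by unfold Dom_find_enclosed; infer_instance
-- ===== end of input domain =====

-- B replaces A's stateful toggle scan by direct per-cell ray casting: for each '.' cell,
-- count the wall chars '|7F' strictly to its left and keep the cell iff that count is odd
-- (objective: alternative algorithm, no running state; B is quadratic per row).

-- ===== PORT A =====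
def pvDown : List Char := ['|', '7', 'F']

def find_enclosed (sample : List String) : List (Int × Int) :=
  (List.range sample.length).foldl (fun (enclosed : List (Int × Int)) (i : Nat) =>
    ((List.range (PySem.List.pyGetD sample 0 "").toList.length).foldl
      (fun (st : Bool × List (Int × Int)) (j : Nat) =>
        let c := PySem.List.pyGetD (PySem.List.pyGetD sample (i : Int) "").toList (j : Int) ' '
        let up := if c ∈ pvDown then !st.1 else st.1
        (up, if up && (c == '.') then st.2 ++ [((i : Int), (j : Int))] else st.2))
      (false, enclosed)).2) []

-- ===== PORT B =====
def pvWalls : List Char := "|7F".toList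

def find_enclosed_alt (sample : List String) : List (Int × Int) :=
  match sample with
  | [] => []
  | s0 :: _ =>
    let w := s0.toList.length
    (List.range sample.length).flatMap (fun (i : Nat) =>
      ((List.range w).filter (fun (j : Nat) =>
          (PySem.List.pyGetD (PySem.List.pyGetD sample (i : Int) "").toList (j : Int) ' ' == '.') &&
          ((List.range j).countP (fun (k : Nat) =>
              decide (PySem.List.pyGetD (PySem.List.pyGetD sample (i : Int) "").toList (k : Int) ' ' ∈ pvWalls))) % 2 == 1)).map
        (fun (j : Nat) => ((i : Int), (j : Int))))

-- ===== PRECONDITION & SPEC =====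
-- Pre_ excludes exactly the ragged inputs where some row is shorter than row 0:
-- there Python A raises IndexError (sample[i][j]) and returns nothing.
def Pre_find_enclosed (sample : List String) : Prop :=
  ∀ s ∈ sample, (sample.headD "").toList.length ≤ s.toList.length
instance (sample : List String) : Decidable (Pre_find_enclosed sample) := by
  unfold Pre_find_enclosed; infer_instance

def pvWitness_find_enclosed : List String := ["F7.", ".|.", "..F"]

def Spec_find_enclosed (sample : List String) (out : List (Int × Int)) : Prop := out = find_enclosed_alt sample
instance (sample : List String) (out : List (Int × Int)) : Decidable (Spec_find_enclosed sample out) := by unfold Spec_find_enclosed; infer_instance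

-- ===== CLAIM (what is proved, stated in full; the proofs are below) =====
def Claim_equal_find_enclosed : Prop := ∀ (sample : List String), Dom_find_enclosed sample → Pre_find_enclosed sample → Spec_find_enclosed sample (find_enclosed sample)

-- ===== LEMMAS AND PROOFS =====

-- parity (odd number of pvDown chars) in row[0..j] inclusive
def parAt : List Char → Nat → Bool
  | [], _ => false
  | c :: _, 0 => decide (c ∈ pvDown)
  | c :: cs, j + 1 => xor (decide (c ∈ pvDown)) (parAt cs j)

-- what one row contributes to the answer
def rowSpec (i : Int) (row : List Char) (w : Nat) : List (Int × Int) :=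
  ((List.range w).filter (fun (j : Nat) => parAt row j && (row.getD j ' ' == '.'))).map
    (fun (j : Nat) => (i, (j : Int)))

def parFold (chars : List Char) (u : Bool) : Bool :=
  chars.foldl (fun p c => xor p (decide (c ∈ pvDown))) u

lemma parFold_shift (chars : List Char) (u : Bool) : parFold chars u = xor u (parFold chars false) := by
  induction chars generalizing u with
  | nil => simp [parFold]
  | cons c cs ih =>
    simp only [parFold, List.foldl_cons] at *
    rw [ih (xor u _), ih (xor false _)]
    cases u <;> simp

lemma parFold_take_succ (row : List Char) (w : Nat) (hw : w < row.length) :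
    parFold (row.take (w + 1)) false =
      xor (parFold (row.take w) false) (decide (row.getD w ' ' ∈ pvDown)) := by
  have h1 : List.take (w + 1) row = List.take w row ++ [row[w]] := by
    rw [List.take_add_one, List.getElem?_eq_getElem hw]; rfl
  rw [h1]
  unfold parFold
  rw [List.foldl_append]
  simp [List.getD, List.getElem?_eq_getElem hw]

lemma parFold_eq_parAt (row : List Char) (j : Nat) (hj : j < row.length) :
    parFold (row.take (j + 1)) false = parAt row j := by
  induction row generalizing j with
  | nil => simp at hj
  | cons c cs ih =>
    cases j with
    | zero => simp [parFold, parAt]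
    | succ j =>
      simp only [List.take_succ_cons, parFold, List.foldl_cons, parAt]
      rw [show (cs.take (j+1)).foldl (fun p c => xor p (decide (c ∈ pvDown))) (xor false (decide (c ∈ pvDown)))
            = parFold (cs.take (j+1)) (xor false (decide (c ∈ pvDown))) from rfl,
          parFold_shift, ih j (by simpa using hj)]
      simp

lemma rowSpec_succ (i : Int) (row : List Char) (w : Nat) :
    rowSpec i row (w + 1) = rowSpec i row w ++
      (if parAt row w && (row.getD w ' ' == '.') then [(i, (w : Int))] else []) := by
  simp only [rowSpec, List.range_succ, List.filter_append, List.filter_cons,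
    List.filter_nil]
  split <;> simp

-- A's inner loop over one row
lemma innerA (row : List Char) (i : Nat) (w : Nat) (hw : w ≤ row.length)
    (acc : List (Int × Int)) :
    (List.range w).foldl
      (fun (st : Bool × List (Int × Int)) (j : Nat) =>
        let c := PySem.List.pyGetD row (j : Int) ' '
        let up := if c ∈ pvDown then !st.1 else st.1
        (up, if up && (c == '.') then st.2 ++ [((i : Int), (j : Int))] else st.2))
      (false, acc)
    = (parFold (row.take w) false, acc ++ rowSpec (i : Int) row w) := by
  induction w with
  | zero => simp [rowSpec, parFold]
  | succ w ih =>
    rw [List.range_succ, List.foldl_append, ih (by omega)]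
    have hw' : w < row.length := by omega
    simp only [List.foldl_cons, List.foldl_nil, PySem.List.pyGetD_natCast]
    have hxor : ∀ (p : Bool) (c : Char),
        (if c ∈ pvDown then !p else p) = xor p (decide (c ∈ pvDown)) := by
      intro p c; by_cases h : c ∈ pvDown <;> simp [h]
    rw [hxor, rowSpec_succ, ← parFold_take_succ row w hw',
        parFold_eq_parAt row w (by omega), ← List.append_assoc]
    split <;> simp

-- B's strictly-left count, moved from range indices to a take
lemma countP_range_take (row : List Char) (P : Char → Bool) :
    ∀ (j : Nat), j ≤ row.length →
      (List.range j).countP (fun k => P (row.getD k ' ')) = (row.take j).countP P := by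
  intro j
  induction j with
  | zero => intro _; simp
  | succ j ih =>
    intro hj
    have hj' : j < row.length := by omega
    rw [List.range_succ, List.countP_append, ih (by omega),
      show row.take (j + 1) = row.take j ++ [row[j]] by
        rw [List.take_add_one, List.getElem?_eq_getElem hj']; rfl,
      List.countP_append]
    simp [List.getD, List.getElem?_eq_getElem hj']

-- odd wall count = A's folded parity
lemma countOdd_parFold (chars : List Char) :
    ((chars.countP (fun c => decide (c ∈ pvDown))) % 2 == 1) = parFold chars false := by
  induction chars with
  | nil => simp [parFold]
  | cons c cs ih =>
    have h1 : parFold (c :: cs) false = xor (decide (c ∈ pvDown)) (parFold cs false) := by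
      simp only [parFold, List.foldl_cons]
      rw [show (cs.foldl (fun p x => xor p (decide (x ∈ pvDown))) (xor false (decide (c ∈ pvDown))))
            = parFold cs (xor false (decide (c ∈ pvDown))) from rfl, parFold_shift]
      cases (decide (c ∈ pvDown)) <;> simp [parFold]
    rw [h1, ← ih, List.countP_cons]
    rcases Nat.mod_two_eq_zero_or_one (cs.countP (fun c => decide (c ∈ pvDown))) with h | h <;>
      cases hd : decide (c ∈ pvDown) <;>
      simp [Nat.add_mod, h]

-- B's per-cell condition equals A's parity condition (for j < row.length)
lemma condB_eq_condA (row : List Char) (j : Nat) (hj : j < row.length) :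
    ((row.getD j ' ' == '.') &&
      (((List.range j).countP (fun k => decide (row.getD k ' ' ∈ pvWalls))) % 2 == 1))
    = (parAt row j && (row.getD j ' ' == '.')) := by
  have hwd : ∀ c : Char, (c ∈ pvWalls) = (c ∈ pvDown) := by
    intro c; rfl
  by_cases hdot : row.getD j ' ' = '.'
  · have hnotwall : ¬ (row[j] ∈ pvDown) := by
      rw [show row[j] = row.getD j ' ' by simp [List.getD, List.getElem?_eq_getElem hj], hdot]
      decide
    have htake : (row.take (j + 1)).countP (fun c => decide (c ∈ pvDown))
        = (row.take j).countP (fun c => decide (c ∈ pvDown)) := by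
      rw [show row.take (j + 1) = row.take j ++ [row[j]] by
        rw [List.take_add_one, List.getElem?_eq_getElem hj]; rfl, List.countP_append]
      simp [hnotwall]
    have hcnt : (((List.range j).countP (fun k => decide (row.getD k ' ' ∈ pvWalls))) % 2 == 1)
        = parAt row j := by
      simp only [hwd]
      simp only [countP_range_take row (fun c => decide (c ∈ pvDown)) j (le_of_lt hj)]
      rw [← parFold_eq_parAt row j hj, ← countOdd_parFold, htake]
    rw [hcnt, Bool.and_comm]
  · have hf : (row.getD j ' ' == '.') = false := beq_eq_false_iff_ne.mpr hdot
    simp only [List.getD_eq_getElem?_getD] at hf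
    simp [hf]

-- ===== VERDICT (by name: the statement is the Claim_ definition above) =====
set_option maxHeartbeats 2000000 in
theorem find_enclosed_spec : Claim_equal_find_enclosed := by
  intro sample _ hpre
  unfold Spec_find_enclosed find_enclosed find_enclosed_alt
  cases sample with
  | nil => rfl
  | cons s0 rest =>
    have hrowlen : ∀ i : Nat, i < (s0 :: rest).length →
        s0.toList.length ≤ ((s0 :: rest).getD i "").toList.length := by
      intro i hi
      have hmem : (s0 :: rest).getD i "" ∈ (s0 :: rest) := by
        rw [List.getD_eq_getElem _ _ hi]; exact List.getElem_mem hi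
      simpa using hpre _ hmem
    have hA : (List.range (s0 :: rest).length).foldl
        (fun (enclosed : List (Int × Int)) (i : Nat) =>
        ((List.range (PySem.List.pyGetD (s0 :: rest) 0 "").toList.length).foldl
          (fun (st : Bool × List (Int × Int)) (j : Nat) =>
            let c := PySem.List.pyGetD (PySem.List.pyGetD (s0 :: rest) (i : Int) "").toList (j : Int) ' '
            let up := if c ∈ pvDown then !st.1 else st.1
            (up, if up && (c == '.') then st.2 ++ [((i : Int), (j : Int))] else st.2))
          (false, enclosed)).2) []
        = (List.range (s0 :: rest).length).flatMap
            (fun (i : Nat) => rowSpec (i : Int) (((s0 :: rest).getD i "").toList) s0.toList.length) := by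
      rw [PySem.List.foldl_congr_mem _ _
        (fun (enclosed : List (Int × Int)) (i : Nat) =>
          enclosed ++ rowSpec (i : Int) (((s0 :: rest).getD i "").toList) s0.toList.length) _ ?_]
      · exact PySem.List.foldl_append_eq_flatMap _ _ _
      · intro acc i hi
        have hi' : i < (s0 :: rest).length := List.mem_range.mp hi
        have h0 : (PySem.List.pyGetD (s0 :: rest) 0 "").toList.length = s0.toList.length := by
          rw [PySem.List.pyGetD_ofNat']; rfl
        rw [h0, PySem.List.pyGetD_natCast]
        exact congrArg Prod.snd
          (innerA (((s0 :: rest).getD i "").toList) i s0.toList.length (hrowlen i hi') acc)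
    rw [hA]
    apply Eq.symm
    apply List.flatMap_congr
    intro i hi
    have hi' : i < (s0 :: rest).length := List.mem_range.mp hi
    rw [PySem.List.pyGetD_natCast]
    unfold rowSpec
    refine congrArg (List.map _) (List.filter_congr ?_)
    intro j hj
    have hjw : j < s0.toList.length := List.mem_range.mp hj
    have hjlen : j < (((s0 :: rest).getD i "").toList).length :=
      lt_of_lt_of_le hjw (hrowlen i hi')
    simp only [PySem.List.pyGetD_natCast]
    exact condB_eq_condA _ j hjlen
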